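-- pv_equiv track=rewrite | github.com/tolfromj/Autonomous_AI_Challenge | ultra/Data_Preparation.py | get_merge_point_idx
-- ===== SOURCE A (Python) =====
-- def get_merge_point_idx(contour1, contour2):
--     idx1 = 0
--     idx2 = 0
--     distance_min = -1
--     for i, p1 in enumerate(contour1):
--         for j, p2 in enumerate(contour2):
--             distance = (p2[0][0] - p1[0][0]) ** 2 + (p2[0][1] - p1[0][1]) ** 2
--             if distance_min < 0:
--                 distance_min = distance
--                 idx1 = i
--                 idx2 = j
--             elif distance < distance_min:
--                 distance_min = distance
--                 idx1 = i
--                 idx2 = j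
--     return idx1, idx2
-- ===== SOURCE B (Python) =====
-- def _dist(p1, p2):
--     return (p2[0][0] - p1[0][0]) ** 2 + (p2[0][1] - p1[0][1]) ** 2
--
--
-- def get_merge_point_idx(contour1, contour2):
--     dists = [[_dist(p1, p2) for p2 in contour2] for p1 in contour1]
--     flat = [d for row in dists for d in row]
--     if not flat:
--         return 0, 0
--     best = min(flat)
--     for i, row in enumerate(dists):
--         if best in row:
--             return i, row.index(best)
-- ===== Notes on version B (the rewrite author's own statement) =====
-- stated objective: alternative
-- what changed: replaces the single-pass best-so-far state machine (idx1, idx2, distance_min with a -1 sentinel) by a two-pass scheme: build the distance matrix, take its global minimum with min(), then locate the first occurrence of that minimum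
import Mathlib
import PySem

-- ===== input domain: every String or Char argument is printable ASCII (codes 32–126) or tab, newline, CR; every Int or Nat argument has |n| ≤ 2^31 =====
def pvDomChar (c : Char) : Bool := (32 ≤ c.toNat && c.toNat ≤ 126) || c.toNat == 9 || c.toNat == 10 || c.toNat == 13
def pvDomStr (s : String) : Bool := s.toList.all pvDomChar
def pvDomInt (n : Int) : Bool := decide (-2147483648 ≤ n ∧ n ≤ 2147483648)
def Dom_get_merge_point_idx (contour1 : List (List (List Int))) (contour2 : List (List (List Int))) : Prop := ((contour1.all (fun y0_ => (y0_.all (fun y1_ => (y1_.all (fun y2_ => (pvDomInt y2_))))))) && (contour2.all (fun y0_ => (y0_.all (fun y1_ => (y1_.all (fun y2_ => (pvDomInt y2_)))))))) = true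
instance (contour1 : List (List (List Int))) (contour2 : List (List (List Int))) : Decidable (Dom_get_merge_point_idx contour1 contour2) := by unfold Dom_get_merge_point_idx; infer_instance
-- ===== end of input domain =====

-- B replaces A's single-pass best-so-far tracking by a two-pass scheme (global minimum
-- of the distance matrix, then first occurrence); equally costly, structurally different.


-- ===== PORT A =====
-- inner 'for j, p2 in enumerate(contour2)' loop; state = (idx1, idx2, distance_min)
def pvInner (p1 : List (List Int)) (i : Int) :
    List (List (List Int)) → Int → Int × Int × Int → Int × Int × Int
  | [], _, s => s
  | p2 :: rest, j, s =>
      let distance :=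
        (PySem.List.pyGetD (PySem.List.pyGetD p2 0 []) 0 0
          - PySem.List.pyGetD (PySem.List.pyGetD p1 0 []) 0 0) ^ 2
        + (PySem.List.pyGetD (PySem.List.pyGetD p2 0 []) 1 0
          - PySem.List.pyGetD (PySem.List.pyGetD p1 0 []) 1 0) ^ 2
      let s' := if s.2.2 < 0 then (i, j, distance)
                else if distance < s.2.2 then (i, j, distance)
                else s
      pvInner p1 i rest (j + 1) s'

-- outer 'for i, p1 in enumerate(contour1)' loop
def pvOuter (contour2 : List (List (List Int))) :
    List (List (List Int)) → Int → Int × Int × Int → Int × Int × Int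
  | [], _, s => s
  | p1 :: rest, i, s => pvOuter contour2 rest (i + 1) (pvInner p1 i contour2 0 s)

def get_merge_point_idx (contour1 : List (List (List Int))) (contour2 : List (List (List Int))) : Int × Int :=
  let r := pvOuter contour2 contour1 0 (0, 0, -1)
  (r.1, r.2.1)

-- ===== PORT B =====
def pvDist (p1 p2 : List (List Int)) : Int :=
  (PySem.List.pyGetD (PySem.List.pyGetD p2 0 []) 0 0
    - PySem.List.pyGetD (PySem.List.pyGetD p1 0 []) 0 0) ^ 2
  + (PySem.List.pyGetD (PySem.List.pyGetD p2 0 []) 1 0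
    - PySem.List.pyGetD (PySem.List.pyGetD p1 0 []) 1 0) ^ 2

-- 'for i, row in enumerate(dists): if best in row: return i, row.index(best)'
def pvFindRow (best : Int) : List (List Int) → Int → Int × Int
  | [], _ => (0, 0)          -- unreachable in B: best always occurs in some row
  | row :: rest, i =>
      if best ∈ row then (i, (((PySem.List.index? row best).getD 0 : Nat) : Int))
      else pvFindRow best rest (i + 1)

def get_merge_point_idx_alt (contour1 : List (List (List Int))) (contour2 : List (List (List Int))) : Int × Int :=
  let dists := contour1.map (fun p1 => contour2.map (fun p2 => pvDist p1 p2))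
  let flat := dists.flatten
  match PySem.List.min? flat (fun x => x) with
  | none => (0, 0)
  | some best => pvFindRow best dists 0

-- ===== PRECONDITION & SPEC =====
-- Pre_ excludes exactly the inputs on which A raises IndexError: both contours nonempty
-- and some point p lacking p[0][0] / p[0][1] (p empty or p[0] shorter than 2).
def Pre_get_merge_point_idx (contour1 : List (List (List Int))) (contour2 : List (List (List Int))) : Prop :=
  contour1 = [] ∨ contour2 = [] ∨
    ((∀ p ∈ contour1, p ≠ [] ∧ 2 ≤ p.headI.length) ∧
     (∀ p ∈ contour2, p ≠ [] ∧ 2 ≤ p.headI.length))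
instance (contour1 : List (List (List Int))) (contour2 : List (List (List Int))) : Decidable (Pre_get_merge_point_idx contour1 contour2) := by unfold Pre_get_merge_point_idx; infer_instance
def pvWitness_get_merge_point_idx : List (List (List Int)) × List (List (List Int)) :=
  ([[[0, 0]], [[3, 4]]], [[[1, 2]], [[0, 1]]])

def Spec_get_merge_point_idx (contour1 : List (List (List Int))) (contour2 : List (List (List Int))) (out : Int × Int) : Prop := out = get_merge_point_idx_alt contour1 contour2
instance (contour1 : List (List (List Int))) (contour2 : List (List (List Int))) (out : Int × Int) : Decidable (Spec_get_merge_point_idx contour1 contour2 out) := by unfold Spec_get_merge_point_idx; infer_instance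

-- ===== CLAIM (what is proved, stated in full; the proofs are below) =====
def Claim_equal_get_merge_point_idx : Prop := ∀ (contour1 : List (List (List Int))) (contour2 : List (List (List Int))), Dom_get_merge_point_idx contour1 contour2 → Pre_get_merge_point_idx contour1 contour2 → Spec_get_merge_point_idx contour1 contour2 (get_merge_point_idx contour1 contour2)

-- ===== LEMMAS AND PROOFS =====

theorem pvDist_nonneg (p1 p2 : List (List Int)) : 0 ≤ pvDist p1 p2 := by
  unfold pvDist; positivity

-- one unrolling of the inner loop, with the two sequential branches merged into one disjunction
theorem pvInner_cons (p1 p2 : List (List Int)) (i j : Int) (rest : List (List (List Int))) (s : Int × Int × Int) :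
    pvInner p1 i (p2 :: rest) j s =
      pvInner p1 i rest (j + 1)
        (if s.2.2 < 0 ∨ pvDist p1 p2 < s.2.2 then (i, j, pvDist p1 p2) else s) := by
  simp only [pvInner, pvDist]
  congr 1
  split_ifs <;> first | rfl | tauto

theorem pvFoldlMin (u : List Int) (d y : Int) :
    u.foldl min (min d y) = min d (u.foldl min y) := by
  induction u generalizing y with
  | nil => rfl
  | cons z u ih => rw [List.foldl_cons, List.foldl_cons, min_assoc, ih]

-- combining minima of two concatenated lists
theorem pvMinAppend (a b : List Int) :
    PySem.List.min? (a ++ b) (fun x => x) =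
      (PySem.List.min? a (fun x => x)).elim (PySem.List.min? b (fun x => x))
        (fun x => (PySem.List.min? b (fun x => x)).elim (some x) (fun y => some (min x y))) := by
  cases a with
  | nil =>
    simp only [List.nil_append]
    rw [show PySem.List.min? ([] : List Int) (fun x => x) = none from rfl]
    rfl
  | cons x t =>
    cases b with
    | nil =>
      rw [List.append_nil, PySem.List.min?_id_cons]
      rfl
    | cons y u =>
      rw [show (x :: t) ++ (y :: u) = x :: (t ++ y :: u) from rfl,
          PySem.List.min?_id_cons, PySem.List.min?_id_cons, PySem.List.min?_id_cons]
      simp only [Option.elim_some]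
      rw [List.foldl_append, List.foldl_cons, pvFoldlMin]

-- characterisation of the inner loop in terms of the row of distances
theorem pvInner_char (p1 : List (List Int)) (i : Int) (c2 : List (List (List Int))) :
    ∀ (j : Int) (s : Int × Int × Int),
      pvInner p1 i c2 j s =
        (PySem.List.min? (c2.map (fun p2 => pvDist p1 p2)) (fun x => x)).elim s
          (fun m =>
            if s.2.2 < 0 ∨ m < s.2.2 then
              (i, j + (((PySem.List.index? (c2.map (fun p2 => pvDist p1 p2)) m).getD 0 : Nat) : Int), m)
            else s) := by
  induction c2 with
  | nil => intro j s; rfl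
  | cons p2 rest ih =>
    intro j s
    rw [pvInner_cons, ih]
    simp only [List.map_cons]
    have hd0 : 0 ≤ pvDist p1 p2 := pvDist_nonneg p1 p2
    generalize hd : pvDist p1 p2 = d at *
    cases hu : rest.map (fun p2 => pvDist p1 p2) with
    | nil =>
      rw [show PySem.List.min? ([] : List Int) (fun x => x) = none from rfl,
          PySem.List.min?_id_cons]
      simp only [Option.elim_none, Option.elim_some, List.foldl_nil,
        PySem.List.index?_cons_self, Option.getD_some, Nat.cast_zero, add_zero]
    | cons y u =>
      rw [PySem.List.min?_id_cons, PySem.List.min?_id_cons]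
      have hmv_mem : u.foldl min y ∈ y :: u := by
        rcases (PySem.List.foldl_min_mem u y) with h | h
        · rw [h]; exact List.mem_cons_self
        · exact List.mem_cons_of_mem _ h
      have hmv0 : 0 ≤ u.foldl min y := by
        have hm : u.foldl min y ∈ rest.map (fun p2 => pvDist p1 p2) := by rw [hu]; exact hmv_mem
        rcases List.mem_map.mp hm with ⟨p, _, hp⟩
        rw [← hp]; exact pvDist_nonneg p1 p
      have hmv_min : ∀ z ∈ y :: u, u.foldl min y ≤ z := by
        intro z hz
        exact PySem.List.min?_isMin (PySem.List.min?_id_cons y u) z hz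
      simp only [Option.elim_some, List.foldl_cons]
      rw [pvFoldlMin]
      generalize hmv : u.foldl min y = mv at *
      by_cases hdm : d ≤ mv
      · rw [min_eq_left hdm]
        by_cases hc0 : s.2.2 < 0 ∨ d < s.2.2
        · rw [if_pos hc0, if_pos hc0,
              if_neg (by simp only []; omega :
                ¬(((i, j, d) : Int × Int × Int).2.2 < 0 ∨ mv < ((i, j, d) : Int × Int × Int).2.2)),
              PySem.List.index?_cons_self]
          simp
        · rw [if_neg hc0, if_neg hc0,
              if_neg (by omega : ¬(s.2.2 < 0 ∨ mv < s.2.2))]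
      · have hdm' : mv < d := by omega
        rw [min_eq_right (le_of_lt hdm')]
        have hne : d ≠ mv := ne_of_gt hdm'
        obtain ⟨k, hk⟩ : ∃ k, PySem.List.index? (y :: u) mv = some k :=
          Option.isSome_iff_exists.mp ((PySem.List.index?_isSome_iff (y :: u) mv).mpr hmv_mem)
        have hidx : PySem.List.index? (d :: y :: u) mv = some (k + 1) := by
          rw [PySem.List.index?_cons_of_ne _ hne, hk]; rfl
        by_cases hc0 : s.2.2 < 0 ∨ d < s.2.2
        · rw [if_pos hc0,
              if_pos (Or.inr hdm' :
                (((i, j, d) : Int × Int × Int).2.2 < 0 ∨ mv < ((i, j, d) : Int × Int × Int).2.2)),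
              if_pos (by omega : s.2.2 < 0 ∨ mv < s.2.2), hk, hidx]
          simp only [Option.getD_some]
          refine Prod.ext rfl (Prod.ext ?_ rfl)
          push_cast; ring
        · rw [if_neg hc0]
          by_cases hms : mv < s.2.2
          · rw [if_pos (Or.inr hms), if_pos (Or.inr hms), hk, hidx]
            simp only [Option.getD_some]
            refine Prod.ext rfl (Prod.ext ?_ rfl)
            push_cast; ring
          · rw [if_neg (by omega : ¬(s.2.2 < 0 ∨ mv < s.2.2)),
                if_neg (by omega : ¬(s.2.2 < 0 ∨ mv < s.2.2))]

-- characterisation of the outer loop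
theorem pvOuter_char (c2 : List (List (List Int))) :
    ∀ (c1 : List (List (List Int))) (i : Int) (s : Int × Int × Int),
      pvOuter c2 c1 i s =
        (PySem.List.min? ((c1.map (fun p1 => c2.map (fun p2 => pvDist p1 p2))).flatten) (fun x => x)).elim s
          (fun m =>
            if s.2.2 < 0 ∨ m < s.2.2 then
              ((pvFindRow m (c1.map (fun p1 => c2.map (fun p2 => pvDist p1 p2))) i).1,
               (pvFindRow m (c1.map (fun p1 => c2.map (fun p2 => pvDist p1 p2))) i).2, m)
            else s) := by
  intro c1
  induction c1 with
  | nil => intro i s; rfl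
  | cons p1 rest ih =>
    intro i s
    show pvOuter c2 rest (i + 1) (pvInner p1 i c2 0 s) = _
    rw [pvInner_char, ih]
    simp only [List.map_cons, List.flatten_cons]
    rw [pvMinAppend]
    cases hr : PySem.List.min? (c2.map (fun p2 => pvDist p1 p2)) (fun x => x) with
    | none =>
      have hre : c2.map (fun p2 => pvDist p1 p2) = [] := (PySem.List.min?_eq_none_iff _ _).mp hr
      simp only [Option.elim_none]
      cases hf : PySem.List.min? ((rest.map (fun p1 => c2.map (fun p2 => pvDist p1 p2))).flatten) (fun x => x) with
      | none => rfl
      | some mf =>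
        simp only [Option.elim_some, hre]
        by_cases hc : s.2.2 < 0 ∨ mf < s.2.2
        · rw [if_pos hc, if_pos hc]
          simp [pvFindRow]
        · rw [if_neg hc, if_neg hc]
    | some mr =>
      have hmr_mem : mr ∈ c2.map (fun p2 => pvDist p1 p2) := PySem.List.min?_mem hr
      have hmr0 : 0 ≤ mr := by
        rcases List.mem_map.mp hmr_mem with ⟨p, _, hp⟩
        rw [← hp]; exact pvDist_nonneg p1 p
      have hmr_min : ∀ z ∈ c2.map (fun p2 => pvDist p1 p2), mr ≤ z := fun z hz =>
        PySem.List.min?_isMin hr z hz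
      simp only [Option.elim_some]
      cases hf : PySem.List.min? ((rest.map (fun p1 => c2.map (fun p2 => pvDist p1 p2))).flatten) (fun x => x) with
      | none =>
        simp only [Option.elim_none, Option.elim_some]
        by_cases hc : s.2.2 < 0 ∨ mr < s.2.2
        · rw [if_pos hc, if_pos hc]
          have hfr : pvFindRow mr (c2.map (fun p2 => pvDist p1 p2) :: rest.map (fun p1 => c2.map (fun p2 => pvDist p1 p2))) i
              = (i, (((PySem.List.index? (c2.map (fun p2 => pvDist p1 p2)) mr).getD 0 : Nat) : Int)) := by
            simp [pvFindRow, hmr_mem]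
          rw [hfr]
          simp
        · rw [if_neg hc, if_neg hc]
      | some mf =>
        simp only [Option.elim_some]
        by_cases hc0 : s.2.2 < 0 ∨ mr < s.2.2
        · rw [if_pos hc0]
          by_cases hmm : mr ≤ mf
          · -- the first row's minimum stays the best
            rw [min_eq_left hmm]
            rw [if_neg (by simp only []; omega :
                  ¬(((i, (0:Int) + (((PySem.List.index? (c2.map (fun p2 => pvDist p1 p2)) mr).getD 0 : Nat) : Int), mr) : Int × Int × Int).2.2 < 0 ∨
                    mf < ((i, (0:Int) + (((PySem.List.index? (c2.map (fun p2 => pvDist p1 p2)) mr).getD 0 : Nat) : Int), mr) : Int × Int × Int).2.2)),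
                if_pos hc0]
            have hfr : pvFindRow mr (c2.map (fun p2 => pvDist p1 p2) :: rest.map (fun p1 => c2.map (fun p2 => pvDist p1 p2))) i
                = (i, (((PySem.List.index? (c2.map (fun p2 => pvDist p1 p2)) mr).getD 0 : Nat) : Int)) := by
              simp [pvFindRow, hmr_mem]
            rw [hfr]
            simp
          · -- a later row wins
            have hmm' : mf < mr := by omega
            rw [min_eq_right (le_of_lt hmm')]
            have hnotmem : mf ∉ c2.map (fun p2 => pvDist p1 p2) := fun hmem =>
              absurd (hmr_min mf hmem) (by omega)
            rw [if_pos (Or.inr hmm' :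
                  (((i, (0:Int) + (((PySem.List.index? (c2.map (fun p2 => pvDist p1 p2)) mr).getD 0 : Nat) : Int), mr) : Int × Int × Int).2.2 < 0 ∨
                    mf < ((i, (0:Int) + (((PySem.List.index? (c2.map (fun p2 => pvDist p1 p2)) mr).getD 0 : Nat) : Int), mr) : Int × Int × Int).2.2)),
                if_pos (by omega : s.2.2 < 0 ∨ mf < s.2.2)]
            have hfr : pvFindRow mf (c2.map (fun p2 => pvDist p1 p2) :: rest.map (fun p1 => c2.map (fun p2 => pvDist p1 p2))) i
                = pvFindRow mf (rest.map (fun p1 => c2.map (fun p2 => pvDist p1 p2))) (i + 1) := by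
              simp [pvFindRow, hnotmem]
            rw [hfr]
        · rw [if_neg hc0]
          by_cases hms : mf < s.2.2
          · have hnotmem : mf ∉ c2.map (fun p2 => pvDist p1 p2) := fun hmem =>
              absurd (hmr_min mf hmem) (by omega)
            rw [if_pos (Or.inr hms), min_eq_right (by omega : mf ≤ mr),
                if_pos (by omega : s.2.2 < 0 ∨ mf < s.2.2)]
            have hfr : pvFindRow mf (c2.map (fun p2 => pvDist p1 p2) :: rest.map (fun p1 => c2.map (fun p2 => pvDist p1 p2))) i
                = pvFindRow mf (rest.map (fun p1 => c2.map (fun p2 => pvDist p1 p2))) (i + 1) := by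
              simp [pvFindRow, hnotmem]
            rw [hfr]
          · rw [if_neg (by omega : ¬(s.2.2 < 0 ∨ mf < s.2.2)),
                if_neg (by rcases le_total mr mf with h | h
                           · rw [min_eq_left h]; omega
                           · rw [min_eq_right h]; omega : ¬(s.2.2 < 0 ∨ min mr mf < s.2.2))]

-- ===== VERDICT (by name: the statement is the Claim_ definition above) =====
theorem get_merge_point_idx_spec : Claim_equal_get_merge_point_idx := by
  intro c1 c2 _ _
  show get_merge_point_idx c1 c2 = get_merge_point_idx_alt c1 c2
  simp only [get_merge_point_idx, get_merge_point_idx_alt]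
  rw [pvOuter_char]
  cases h : PySem.List.min? ((c1.map (fun p1 => c2.map (fun p2 => pvDist p1 p2))).flatten) (fun x => x) with
  | none => rfl
  | some m =>
    have hcond : ((0:Int), (0:Int), (-1:Int)).2.2 < 0 ∨ m < ((0:Int), (0:Int), (-1:Int)).2.2 :=
      Or.inl (by norm_num)
    simp only [Option.elim_some, if_pos hcond]
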